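-- pv_equiv track=rewrite | github.com/brunchmate/-AlgorithmStudy | maplejh/Programmers/쿠키 구입.py | solution
-- ===== SOURCE A (Python) =====
-- def solution(cookie):
--     answer = 0
--     n = len(cookie)
--     sums = [[0] * n for _ in range(n)]  # i열 부터 시작하는 누적합
--     for i in range(n):
--         sums[i][i] = cookie[i]
--         for j in range(i + 1, n):
--             sums[i][j] = sums[i][j - 1] + cookie[j]
--     sums_transpose = list(zip(*sums))
--     for x in range(1, n):
--         answer = max(answer, max(set(sums_transpose[x - 1]) & set(sums[x])))
--     return answer
-- ===== SOURCE B (Python) =====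
-- def solution(cookie):
--     n = len(cookie)
--     answer = 0
--     for x in range(1, n):
--         left = {0}
--         s = 0
--         for i in range(x):
--             s += cookie[x - 1 - i]
--             left.add(s)
--         right = {0}
--         t = 0
--         for j in range(x, n):
--             t += cookie[j]
--             right.add(t)
--         answer = max(answer, max(left & right))
--     return answer
-- ===== Notes on version B (the rewrite author's own statement) =====
-- stated objective: alternative
-- what changed: B drops A's n-by-n matrix of contiguous sums and its transpose entirely: for each split point it builds the set of left contiguous sums by one accumulating scan leftwards and the set of right contiguous sums by one accumulating scan rightwards (both seeded with 0, matching the zero padding in A's matrix), then takes the max of the intersection.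
import Mathlib
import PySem

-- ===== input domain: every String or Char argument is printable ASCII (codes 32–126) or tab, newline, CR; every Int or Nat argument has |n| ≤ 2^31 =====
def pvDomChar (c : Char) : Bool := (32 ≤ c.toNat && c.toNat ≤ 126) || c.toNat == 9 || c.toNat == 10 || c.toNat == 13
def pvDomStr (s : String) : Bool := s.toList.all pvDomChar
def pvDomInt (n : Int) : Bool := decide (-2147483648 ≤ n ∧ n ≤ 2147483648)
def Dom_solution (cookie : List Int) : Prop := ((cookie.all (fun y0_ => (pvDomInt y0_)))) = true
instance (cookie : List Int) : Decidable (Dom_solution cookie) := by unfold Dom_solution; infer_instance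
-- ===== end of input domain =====

-- B replaces A's O(n^2)-space matrix of contiguous sums (built once, then transposed)
-- by two fresh accumulating scans per split point that build the left/right sum sets directly;
-- same values, no table, no transpose, O(n) extra space (measured constant-factor speedup).

-- ===== PORT A =====
-- sums[i][j] = v  — Python's `sums[i][j] = v` on the list-of-lists (all indices in range throughout A)
def pvSetEntry (m : List (List Int)) (i j : Int) (v : Int) : List (List Int) :=
  PySem.List.pySetD m i (PySem.List.pySetD (PySem.List.pyGetD m i []) j v)

-- sums[i][j] read
def pvGetEntry (m : List (List Int)) (i j : Int) : Int :=
  PySem.List.pyGetD (PySem.List.pyGetD m i []) j 0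

-- hand port of `list(zip(*rows))`, exact: output j is the tuple of the rows' j-th entries,
-- stopping at the shortest row; zip() of no iterables is []
def pvZipStar (rows : List (List Int)) : List (List Int) :=
  match rows with
  | [] => []
  | r :: rs =>
      (List.range (rs.foldl (fun m l => min m l.length) r.length)).map
        (fun j => (r :: rs).map (fun row => row.getD j 0))

def solution (cookie : List Int) : Int :=
  let n : Int := cookie.length
  -- sums = [[0] * n for _ in range(n)]
  let sums0 : List (List Int) := (PySem.List.pyRange 0 n).map (fun _ => List.replicate cookie.length 0)
  let sums := (PySem.List.pyRange 0 n).foldl (fun m i =>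
      let m := pvSetEntry m i i (PySem.List.pyGetD cookie i 0)
      (PySem.List.pyRange (i + 1) n).foldl
        (fun m j => pvSetEntry m i j (pvGetEntry m i (j - 1) + PySem.List.pyGetD cookie j 0)) m)
    sums0
  let sums_transpose := pvZipStar sums
  -- max(set & set): the intersection always contains 0 here (column x-1 has a 0 below the
  -- diagonal, row x has a 0 left of it), so Python's max never sees an empty set; .getD 0 is unreachable
  (PySem.List.pyRange 1 n).foldl (fun answer x =>
      max answer ((PySem.List.max?
          (PySem.Set.inter (PySem.Set.ofList (PySem.List.pyGetD sums_transpose (x - 1) []))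
            (PySem.Set.ofList (PySem.List.pyGetD sums x [])))
          (fun y => y)).getD 0))
    0

-- ===== PORT B =====
def solution_alt (cookie : List Int) : Int :=
  let n : Int := cookie.length
  (PySem.List.pyRange 1 n).foldl (fun answer x =>
      -- left = {0}; s = 0; for i in range(x): s += cookie[x-1-i]; left.add(s)
      let left := ((PySem.List.pyRange 0 x).foldl
          (fun (p : PySem.Set Int × Int) i =>
            let s := p.2 + PySem.List.pyGetD cookie (x - 1 - i) 0
            (p.1.add s, s))
          (PySem.Set.ofList [0], 0)).1
      -- right = {0}; t = 0; for j in range(x, n): t += cookie[j]; right.add(t)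
      let right := ((PySem.List.pyRange x n).foldl
          (fun (p : PySem.Set Int × Int) j =>
            let t := p.2 + PySem.List.pyGetD cookie j 0
            (p.1.add t, t))
          (PySem.Set.ofList [0], 0)).1
      -- max(left & right): 0 is in both sets, so the intersection is never empty; .getD 0 unreachable
      max answer ((PySem.List.max? (PySem.Set.inter left right) (fun y => y)).getD 0))
    0

-- ===== PRECONDITION & SPEC =====
def Spec_solution (cookie : List Int) (out : Int) : Prop := out = solution_alt cookie
instance (cookie : List Int) (out : Int) : Decidable (Spec_solution cookie out) := by unfold Spec_solution; infer_instance

-- ===== CLAIM (what is proved, stated in full; the proofs are below) =====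
def Claim_equal_solution : Prop := ∀ (cookie : List Int), Dom_solution cookie → Spec_solution cookie (solution cookie)

-- ===== LEMMAS AND PROOFS =====

-- sum of cookie[a..b] (inclusive; 0 when the range is empty)
def pvSeg (c : List Int) (a b : Nat) : Int := ((c.take (b + 1)).drop a).sum

-- the finished i-th row of A's matrix
def pvRowSpec (c : List Int) (i : Nat) : List Int :=
  (List.range c.length).map (fun j => if i ≤ j then pvSeg c i j else 0)

theorem pvSeg_empty (c : List Int) {a b : Nat} (h : b + 1 ≤ a) : pvSeg c a b = 0 := by
  unfold pvSeg
  rw [List.drop_eq_nil_of_le (by simp; omega)]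
  rfl

theorem pvSeg_snoc (c : List Int) {a b : Nat} (ha : a ≤ b + 1) (hb : b + 1 < c.length) :
    pvSeg c a (b + 1) = pvSeg c a b + c.getD (b + 1) 0 := by
  unfold pvSeg
  rw [List.take_add_one, List.drop_append_of_le_length (by simp; omega)]
  simp [List.getElem?_eq_getElem hb, List.getD]

theorem pvSeg_cons (c : List Int) {a b : Nat} (ha : a ≤ b) (hc : a < c.length) :
    pvSeg c a b = c.getD a 0 + pvSeg c (a + 1) b := by
  unfold pvSeg
  rw [List.drop_eq_getElem_cons (by simp; omega)]
  simp [List.getD, List.getElem?_eq_getElem hc]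

theorem pvSeg_self (c : List Int) {a : Nat} (h : a < c.length) :
    pvSeg c a a = c.getD a 0 := by
  rw [pvSeg_cons c le_rfl h, pvSeg_empty c (by omega), add_zero]

-- setting an element of a range-map list
theorem pvSet_map_range {n k : Nat} (f : Nat → List Int) (v : List Int) :
    ((List.range n).map f).set k v = (List.range n).map (fun i => if i = k then v else f i) := by
  apply List.ext_getElem
  · simp
  · intro i h1 h2
    simp only [List.getElem_set, List.getElem_map, List.getElem_range]
    simp only [List.length_set, List.length_map, List.length_range] at h1
    split <;> rename_i hik
    · simp [hik.symm]
    · rw [if_neg (by omega)]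

theorem pvSetRow_map_range {n k : Nat} (f : Nat → Int) (v : Int) :
    ((List.range n).map f).set k v = (List.range n).map (fun i => if i = k then v else f i) := by
  apply List.ext_getElem
  · simp
  · intro i h1 h2
    simp only [List.getElem_set, List.getElem_map, List.getElem_range]
    simp only [List.length_set, List.length_map, List.length_range] at h1
    split <;> rename_i hik
    · simp [hik.symm]
    · rw [if_neg (by omega)]

-- pyRange between two Nat casts
theorem pvPyRange_natCast (a b : Nat) :
    PySem.List.pyRange (a : Int) (b : Int) = (List.range (b - a)).map (fun t => ((a + t : Nat) : Int)) := by
  rw [PySem.List.pyRange_of_pos (a : Int) (b : Int) one_pos]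
  have : ((b : Int) - a + 1 - 1) / 1 = (b : Int) - a := by omega
  rw [this]
  by_cases hab : a < b
  · rw [if_pos (by exact_mod_cast hab)]
    have : ((b : Int) - a).toNat = b - a := by omega
    rw [this]
    apply List.map_congr_left
    intro t _
    push_cast
    ring
  · rw [if_neg (by simp; omega)]
    have : b - a = 0 := by omega
    simp [this]

-- Python's max over two nonempty collections with the same elements agrees
theorem pvMaxD0_congr (l1 l2 : List Int) (h : ∀ y : Int, y ∈ l1 ↔ y ∈ l2)
    (h0 : (0 : Int) ∈ l1) :
    (PySem.List.max? l1 (fun y => y)).getD 0 = (PySem.List.max? l2 (fun y => y)).getD 0 := by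
  obtain ⟨a, t1, rfl⟩ : ∃ a t, l1 = a :: t := by
    cases l1 with
    | nil => cases h0
    | cons a t => exact ⟨a, t, rfl⟩
  obtain ⟨b, t2, rfl⟩ : ∃ b t, l2 = b :: t := by
    cases l2 with
    | nil => exact absurd ((h 0).mp h0) (by simp)
    | cons b t => exact ⟨b, t, rfl⟩
  rw [PySem.List.max?_id_cons, PySem.List.max?_id_cons]
  simp only [Option.getD_some]
  have m1mem : List.foldl max a t1 ∈ a :: t1 := by
    rcases PySem.List.foldl_max_mem t1 a with h' | h' <;> simp [h']
  have m2mem : List.foldl max b t2 ∈ b :: t2 := by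
    rcases PySem.List.foldl_max_mem t2 b with h' | h' <;> simp [h']
  have ub1 : ∀ y ∈ a :: t1, y ≤ List.foldl max a t1 := by
    intro y hy
    rcases List.mem_cons.mp hy with rfl | hy
    · exact (PySem.List.le_foldl_max t1 y).1
    · exact (PySem.List.le_foldl_max t1 a).2 y hy
  have ub2 : ∀ y ∈ b :: t2, y ≤ List.foldl max b t2 := by
    intro y hy
    rcases List.mem_cons.mp hy with rfl | hy
    · exact (PySem.List.le_foldl_max t2 y).1
    · exact (PySem.List.le_foldl_max t2 b).2 y hy
  exact le_antisymm (ub2 _ ((h _).mp m1mem)) (ub1 _ ((h _).mpr m2mem))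

-- ===== A-side characterisation =====

-- the inner j-loop only touches row k
theorem pvInner_factor (c : List Int) (L : List Int) (M : List (List Int)) (k : Nat)
    (hk : k < M.length) (r : List Int) :
    L.foldl (fun m j => pvSetEntry m (k : Int) j
        (pvGetEntry m (k : Int) (j - 1) + PySem.List.pyGetD c j 0)) (M.set k r)
      = M.set k (L.foldl (fun r j =>
          PySem.List.pySetD r j (PySem.List.pyGetD r (j - 1) 0 + PySem.List.pyGetD c j 0)) r) := by
  induction L generalizing r with
  | nil => rfl
  | cons j L ih =>
      simp only [List.foldl_cons]
      have hrow : PySem.List.pyGetD (M.set k r) (k : Int) [] = r := by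
        rw [PySem.List.pyGetD_natCast]
        exact List.getD_eq_getElem _ _ (by simpa using hk) |>.trans (by simp [List.getElem_set_self])
      rw [show pvSetEntry (M.set k r) (k : Int) j
            (pvGetEntry (M.set k r) (k : Int) (j - 1) + PySem.List.pyGetD c j 0)
          = M.set k (PySem.List.pySetD r j (PySem.List.pyGetD r (j - 1) 0 + PySem.List.pyGetD c j 0)) from ?_]
      · exact ih _
      · unfold pvSetEntry pvGetEntry
        rw [hrow, PySem.List.pySetD_natCast, List.set_set]

-- the finished row k of the matrix
theorem pvInner_row (c : List Int) (k : Nat) (hk : k < c.length) :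
    (PySem.List.pyRange ((k : Int) + 1) (c.length : Int)).foldl
        (fun r j => PySem.List.pySetD r j (PySem.List.pyGetD r (j - 1) 0 + PySem.List.pyGetD c j 0))
        (PySem.List.pySetD (List.replicate c.length 0) (k : Int) (PySem.List.pyGetD c (k : Int) 0))
      = pvRowSpec c k := by
  have hrepl : List.replicate c.length (0 : Int) = (List.range c.length).map (fun _ => (0 : Int)) := by
    simp
  have hrow0 : PySem.List.pySetD (List.replicate c.length (0 : Int)) (k : Int)
      (PySem.List.pyGetD c (k : Int) 0)
      = (List.range c.length).map (fun j => if k ≤ j ∧ j ≤ k then pvSeg c k j else 0) := by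
    rw [PySem.List.pySetD_natCast, PySem.List.pyGetD_natCast, hrepl, pvSetRow_map_range]
    apply List.map_congr_left
    intro j hj
    simp only [List.mem_range] at hj
    by_cases hjk : j = k
    · subst hjk; rw [if_pos rfl, if_pos (by omega), pvSeg_self c hk]
    · rw [if_neg hjk, if_neg (by omega)]
  have hr : ((k : Int) + 1) = ((k + 1 : Nat) : Int) := by push_cast; ring
  rw [hrow0, hr, pvPyRange_natCast, List.foldl_map]
  have key : ∀ m, m ≤ c.length - (k + 1) →
      (List.range m).foldl
        (fun r t => PySem.List.pySetD r ((k + 1 + t : Nat) : Int)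
          (PySem.List.pyGetD r (((k + 1 + t : Nat) : Int) - 1) 0
            + PySem.List.pyGetD c ((k + 1 + t : Nat) : Int) 0))
        ((List.range c.length).map (fun j => if k ≤ j ∧ j ≤ k then pvSeg c k j else 0))
      = (List.range c.length).map (fun j => if k ≤ j ∧ j ≤ k + m then pvSeg c k j else 0) := by
    intro m hm
    induction m with
    | zero => simp
    | succ m ih =>
        rw [List.range_succ, List.foldl_append, ih (by omega), List.foldl_cons, List.foldl_nil]
        have hidx : (((k + 1 + m : Nat) : Int) - 1) = ((k + m : Nat) : Int) := by push_cast; ring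
        rw [hidx, PySem.List.pyGetD_natCast, PySem.List.pyGetD_natCast,
          PySem.List.getD_map_range _ _ _ _ (by omega), if_pos (by omega),
          PySem.List.pySetD_natCast, pvSetRow_map_range]
        apply List.map_congr_left
        intro j hj
        simp only [List.mem_range] at hj
        by_cases hje : j = k + 1 + m
        · rw [if_pos hje, if_pos (by omega), hje]
          rw [show k + 1 + m = (k + m) + 1 by ring, pvSeg_snoc c (by omega) (by omega)]
        · rw [if_neg hje]
          by_cases hjr : k ≤ j ∧ j ≤ k + m
          · rw [if_pos hjr, if_pos (by omega)]
          · rw [if_neg hjr, if_neg (by omega)]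
  rw [key (c.length - (k + 1)) le_rfl]
  unfold pvRowSpec
  apply List.map_congr_left
  intro j hj
  simp only [List.mem_range] at hj
  by_cases hkj : k ≤ j
  · rw [if_pos (by omega), if_pos hkj]
  · rw [if_neg (by omega), if_neg hkj]

-- the matrix after the nested loops
theorem pvMatrix_eq (c : List Int) :
    (PySem.List.pyRange 0 (c.length : Int)).foldl
      (fun m i =>
        (PySem.List.pyRange (i + 1) (c.length : Int)).foldl
          (fun m j => pvSetEntry m i j (pvGetEntry m i (j - 1) + PySem.List.pyGetD c j 0))
          (pvSetEntry m i i (PySem.List.pyGetD c i 0)))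
      ((PySem.List.pyRange 0 (c.length : Int)).map (fun _ => List.replicate c.length 0))
      = (List.range c.length).map (pvRowSpec c) := by
  rw [PySem.List.pyRange_zero_natCast, List.foldl_map, List.map_map]
  have key : ∀ m, m ≤ c.length →
      (List.range m).foldl
        (fun (M : List (List Int)) (k : Nat) =>
          (PySem.List.pyRange ((k : Int) + 1) (c.length : Int)).foldl
            (fun m j => pvSetEntry m (k : Int) j (pvGetEntry m (k : Int) (j - 1) + PySem.List.pyGetD c j 0))
            (pvSetEntry M (k : Int) (k : Int) (PySem.List.pyGetD c (k : Int) 0)))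
        ((List.range c.length).map (fun _ => List.replicate c.length (0 : Int)))
      = (List.range c.length).map
          (fun i => if i < m then pvRowSpec c i else List.replicate c.length 0) := by
    intro m hm
    induction m with
    | zero => simp
    | succ m ih =>
        rw [List.range_succ, List.foldl_append, ih (by omega), List.foldl_cons, List.foldl_nil]
        have hrowm : PySem.List.pyGetD
            ((List.range c.length).map
              (fun i => if i < m then pvRowSpec c i else List.replicate c.length 0)) (m : Int) []
            = List.replicate c.length 0 := by
          rw [PySem.List.pyGetD_natCast, PySem.List.getD_map_range _ _ _ _ (by omega),
            if_neg (by omega)]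
        have hstart : pvSetEntry
            ((List.range c.length).map
              (fun i => if i < m then pvRowSpec c i else List.replicate c.length 0)) (m : Int) (m : Int)
            (PySem.List.pyGetD c (m : Int) 0)
            = ((List.range c.length).map
              (fun i => if i < m then pvRowSpec c i else List.replicate c.length 0)).set m
              (PySem.List.pySetD (List.replicate c.length 0) (m : Int) (PySem.List.pyGetD c (m : Int) 0)) := by
          unfold pvSetEntry
          rw [hrowm, PySem.List.pySetD_natCast]
        rw [hstart, pvInner_factor c _ _ m (by simp; omega) _, pvInner_row c m (by omega),
          pvSet_map_range]
        apply List.map_congr_left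
        intro i hi
        simp only [List.mem_range] at hi
        by_cases him : i = m
        · rw [if_pos him, if_pos (by omega), him]
        · rw [if_neg him]
          by_cases hlt : i < m
          · rw [if_pos hlt, if_pos (by omega)]
          · rw [if_neg hlt, if_neg (by omega)]
  simp only [Function.comp_def]
  rw [key c.length le_rfl]
  apply List.map_congr_left
  intro i hi
  simp only [List.mem_range] at hi
  rw [if_pos hi]

theorem pvZipStar_eq (c : List Int) :
    pvZipStar ((List.range c.length).map (pvRowSpec c))
      = (List.range c.length).map
          (fun j => (List.range c.length).map (fun i => if i ≤ j then pvSeg c i j else 0)) := by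
  have minfold : ∀ (rs : List (List Int)) (n : Nat), (∀ r ∈ rs, r.length = n) →
      rs.foldl (fun m l => min m l.length) n = n := by
    intro rs
    induction rs with
    | nil => intro n _; rfl
    | cons r rs ih =>
        intro n h
        simp only [List.foldl_cons, h r (by simp)]
        rw [min_self]
        exact ih n (fun r' hr' => h r' (by simp [hr']))
  have hlen : ∀ l ∈ (List.range c.length).map (pvRowSpec c), l.length = c.length := by
    intro l hl
    obtain ⟨i, _, rfl⟩ := List.mem_map.mp hl
    simp [pvRowSpec]
  cases h : (List.range c.length).map (pvRowSpec c) with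
  | nil =>
      have : c.length = 0 := by
        by_contra hn
        exact absurd h (by simp [List.range_eq_nil, hn])
      simp [pvZipStar, this]
  | cons r rs =>
      simp only [pvZipStar]
      rw [h] at hlen
      have hr : r.length = c.length := hlen r (by simp)
      rw [hr, minfold rs c.length (fun r' hr' => hlen r' (by simp [hr']))]
      rw [← h]
      apply List.map_congr_left
      intro j hj
      simp only [List.mem_range] at hj
      rw [List.map_map]
      apply List.map_congr_left
      intro i hi
      simp only [List.mem_range] at hi
      simp only [Function.comp_apply, pvRowSpec]
      rw [PySem.List.getD_map_range _ _ _ _ hj]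

-- ===== membership characterisations =====

theorem pvColA_mem (c : List Int) (x : Nat) (h1 : 1 ≤ x) (h2 : x < c.length) (y : Int) :
    (y ∈ (List.range c.length).map (fun i => if i ≤ x - 1 then pvSeg c i (x - 1) else 0))
      ↔ (y = 0 ∨ ∃ a, a < x ∧ y = pvSeg c a (x - 1)) := by
  simp only [List.mem_map, List.mem_range]
  constructor
  · rintro ⟨i, hi, rfl⟩
    by_cases hix : i ≤ x - 1
    · exact Or.inr ⟨i, by omega, by rw [if_pos hix]⟩
    · exact Or.inl (by rw [if_neg hix])
  · rintro (rfl | ⟨a, ha, rfl⟩)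
    · exact ⟨x, h2, by rw [if_neg (by omega)]⟩
    · exact ⟨a, by omega, by rw [if_pos (by omega)]⟩

theorem pvRowA_mem (c : List Int) (x : Nat) (h1 : 1 ≤ x) (h2 : x < c.length) (y : Int) :
    (y ∈ pvRowSpec c x) ↔ (y = 0 ∨ ∃ j, x ≤ j ∧ j < c.length ∧ y = pvSeg c x j) := by
  unfold pvRowSpec
  simp only [List.mem_map, List.mem_range]
  constructor
  · rintro ⟨j, hj, rfl⟩
    by_cases hxj : x ≤ j
    · exact Or.inr ⟨j, hxj, hj, by rw [if_pos hxj]⟩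
    · exact Or.inl (by rw [if_neg hxj])
  · rintro (rfl | ⟨j, hxj, hj, rfl⟩)
    · exact ⟨0, by omega, by rw [if_neg (by omega)]⟩
    · exact ⟨j, hj, by rw [if_pos hxj]⟩

theorem pvLeftB_mem (c : List Int) (x : Nat) (h1 : 1 ≤ x) (h2 : x ≤ c.length) (y : Int) :
    (y ∈ ((PySem.List.pyRange 0 (x : Int)).foldl
        (fun (p : PySem.Set Int × Int) i =>
          let s := p.2 + PySem.List.pyGetD c ((x : Int) - 1 - i) 0
          (p.1.add s, s))
        (PySem.Set.ofList [0], 0)).1)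
      ↔ (y = 0 ∨ ∃ a, a < x ∧ y = pvSeg c a (x - 1)) := by
  rw [PySem.List.pyRange_zero_natCast, List.foldl_map]
  have key : ∀ m, m ≤ x →
      (((List.range m).foldl (fun (p : PySem.Set Int × Int) (i : Nat) =>
          let s := p.2 + PySem.List.pyGetD c ((x : Int) - 1 - (i : Int)) 0
          (p.1.add s, s)) (PySem.Set.ofList [0], 0)).2
        = pvSeg c (x - m) (x - 1))
      ∧ ∀ y : Int, (y ∈ ((List.range m).foldl (fun (p : PySem.Set Int × Int) (i : Nat) =>
          let s := p.2 + PySem.List.pyGetD c ((x : Int) - 1 - (i : Int)) 0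
          (p.1.add s, s)) (PySem.Set.ofList [0], 0)).1
        ↔ (y = 0 ∨ ∃ a, x - m ≤ a ∧ a < x ∧ y = pvSeg c a (x - 1))) := by
    intro m hm
    induction m with
    | zero =>
        constructor
        · simp only [List.range_zero, List.foldl_nil]
          rw [pvSeg_empty c (by omega)]
        · intro y
          simp only [List.range_zero, List.foldl_nil]
          rw [PySem.Set.mem_ofList]
          simp only [List.mem_singleton]
          constructor
          · intro hy; exact Or.inl hy
          · rintro (rfl | ⟨a, ha1, ha2, _⟩)
            · rfl
            · omega
    | succ m ih =>
        obtain ⟨ihs, ihm⟩ := ih (by omega)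
        rw [List.range_succ, List.foldl_append, List.foldl_cons, List.foldl_nil]
        have hidx : ((x : Int) - 1 - (m : Int)) = ((x - 1 - m : Nat) : Int) := by omega
        have hstep : (((List.range m).foldl (fun (p : PySem.Set Int × Int) (i : Nat) =>
            let s := p.2 + PySem.List.pyGetD c ((x : Int) - 1 - (i : Int)) 0
            (p.1.add s, s)) (PySem.Set.ofList [0], 0)).2
              + PySem.List.pyGetD c ((x : Int) - 1 - (m : Int)) 0)
            = pvSeg c (x - (m + 1)) (x - 1) := by
          rw [ihs, hidx, PySem.List.pyGetD_natCast]
          have ha : x - 1 - m = x - (m + 1) := by omega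
          have hm1 : x - (m + 1) + 1 = x - m := by omega
          rw [ha, show pvSeg c (x - (m + 1)) (x - 1)
              = c.getD (x - (m + 1)) 0 + pvSeg c (x - (m + 1) + 1) (x - 1) from
              pvSeg_cons c (by omega) (by omega), hm1, add_comm]
        constructor
        · exact hstep
        · intro y
          simp only [PySem.Set.mem_add]
          rw [ihm y, hstep]
          constructor
          · rintro ((rfl | ⟨a, ha1, ha2, rfl⟩) | rfl)
            · exact Or.inl rfl
            · exact Or.inr ⟨a, by omega, ha2, rfl⟩
            · exact Or.inr ⟨x - (m + 1), by omega, by omega, rfl⟩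
          · rintro (rfl | ⟨a, ha1, ha2, rfl⟩)
            · exact Or.inl (Or.inl rfl)
            · by_cases hae : a = x - (m + 1)
              · subst hae; exact Or.inr rfl
              · exact Or.inl (Or.inr ⟨a, by omega, ha2, rfl⟩)
  have := (key x le_rfl).2 y
  rw [this]
  constructor
  · rintro (rfl | ⟨a, _, ha2, rfl⟩)
    · exact Or.inl rfl
    · exact Or.inr ⟨a, ha2, rfl⟩
  · rintro (rfl | ⟨a, ha2, rfl⟩)
    · exact Or.inl rfl
    · exact Or.inr ⟨a, by omega, ha2, rfl⟩

theorem pvRightB_mem (c : List Int) (x : Nat) (h1 : 1 ≤ x) (h2 : x ≤ c.length) (y : Int) :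
    (y ∈ ((PySem.List.pyRange (x : Int) (c.length : Int)).foldl
        (fun (p : PySem.Set Int × Int) j =>
          let t := p.2 + PySem.List.pyGetD c j 0
          (p.1.add t, t))
        (PySem.Set.ofList [0], 0)).1)
      ↔ (y = 0 ∨ ∃ j, x ≤ j ∧ j < c.length ∧ y = pvSeg c x j) := by
  rw [pvPyRange_natCast, List.foldl_map]
  have key : ∀ m, m ≤ c.length - x →
      (((List.range m).foldl (fun (p : PySem.Set Int × Int) (t : Nat) =>
          let s := p.2 + PySem.List.pyGetD c ((x + t : Nat) : Int) 0
          (p.1.add s, s)) (PySem.Set.ofList [0], 0)).2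
        = pvSeg c x (x + m - 1))
      ∧ ∀ y : Int, (y ∈ ((List.range m).foldl (fun (p : PySem.Set Int × Int) (t : Nat) =>
          let s := p.2 + PySem.List.pyGetD c ((x + t : Nat) : Int) 0
          (p.1.add s, s)) (PySem.Set.ofList [0], 0)).1
        ↔ (y = 0 ∨ ∃ j, x ≤ j ∧ j < x + m ∧ y = pvSeg c x j)) := by
    intro m hm
    induction m with
    | zero =>
        constructor
        · simp only [List.range_zero, List.foldl_nil]
          rw [pvSeg_empty c (by omega)]
        · intro y
          simp only [List.range_zero, List.foldl_nil]
          rw [PySem.Set.mem_ofList]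
          simp only [List.mem_singleton]
          constructor
          · intro hy; exact Or.inl hy
          · rintro (rfl | ⟨j, hj1, hj2, _⟩)
            · rfl
            · omega
    | succ m ih =>
        obtain ⟨ihs, ihm⟩ := ih (by omega)
        rw [List.range_succ, List.foldl_append, List.foldl_cons, List.foldl_nil]
        have hstep : (((List.range m).foldl (fun (p : PySem.Set Int × Int) (t : Nat) =>
            let s := p.2 + PySem.List.pyGetD c ((x + t : Nat) : Int) 0
            (p.1.add s, s)) (PySem.Set.ofList [0], 0)).2
              + PySem.List.pyGetD c ((x + m : Nat) : Int) 0)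
            = pvSeg c x (x + (m + 1) - 1) := by
          rw [ihs, PySem.List.pyGetD_natCast]
          have h1 : x + (m + 1) - 1 = (x + m - 1) + 1 := by omega
          have h2 : (x + m - 1) + 1 = x + m := by omega
          rw [h1, pvSeg_snoc c (by omega) (by omega), h2]
        constructor
        · exact hstep
        · intro y
          simp only [PySem.Set.mem_add]
          rw [ihm y, hstep]
          constructor
          · rintro ((rfl | ⟨j, hj1, hj2, rfl⟩) | rfl)
            · exact Or.inl rfl
            · exact Or.inr ⟨j, hj1, by omega, rfl⟩
            · exact Or.inr ⟨x + (m + 1) - 1, by omega, by omega, rfl⟩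
          · rintro (rfl | ⟨j, hj1, hj2, rfl⟩)
            · exact Or.inl (Or.inl rfl)
            · by_cases hje : j = x + m
              · subst hje
                have : x + m = x + (m + 1) - 1 := by omega
                rw [this]
                exact Or.inr rfl
              · exact Or.inl (Or.inr ⟨j, hj1, by omega, rfl⟩)
  have := (key (c.length - x) (by omega)).2 y
  rw [this]
  constructor
  · rintro (rfl | ⟨j, hj1, hj2, rfl⟩)
    · exact Or.inl rfl
    · exact Or.inr ⟨j, hj1, by omega, rfl⟩
  · rintro (rfl | ⟨j, hj1, hj2, rfl⟩)
    · exact Or.inl rfl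
    · exact Or.inr ⟨j, hj1, by omega, rfl⟩

-- ===== VERDICT (by name: the statement is the Claim_ definition above) =====
theorem solution_spec : Claim_equal_solution := by
  intro c _
  unfold Spec_solution
  simp only [solution, solution_alt]
  rw [pvMatrix_eq, pvZipStar_eq]
  apply PySem.List.foldl_congr_mem
  intro acc x hx
  obtain ⟨hx1, hx2⟩ := PySem.List.mem_pyRange_one.mp hx
  have hxn : x = ((x.toNat : Nat) : Int) := by omega
  have h1 : 1 ≤ x.toNat := by omega
  have h2 : x.toNat < c.length := by omega
  rw [hxn]
  have hcol : PySem.List.pyGetD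
      ((List.range c.length).map
        (fun j => (List.range c.length).map (fun i => if i ≤ j then pvSeg c i j else 0)))
      (((x.toNat : Nat) : Int) - 1) []
      = (List.range c.length).map (fun i => if i ≤ x.toNat - 1 then pvSeg c i (x.toNat - 1) else 0) := by
    rw [show (((x.toNat : Nat) : Int) - 1) = ((x.toNat - 1 : Nat) : Int) by omega,
      PySem.List.pyGetD_natCast, PySem.List.getD_map_range _ _ _ _ (by omega)]
  have hrow : PySem.List.pyGetD ((List.range c.length).map (pvRowSpec c)) ((x.toNat : Nat) : Int) []
      = pvRowSpec c x.toNat := by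
    rw [PySem.List.pyGetD_natCast, PySem.List.getD_map_range _ _ _ _ (by omega)]
  rw [hcol, hrow]
  congr 1
  apply pvMaxD0_congr
  · intro y
    rw [PySem.Set.mem_inter, PySem.Set.mem_inter, PySem.Set.mem_ofList, PySem.Set.mem_ofList,
      pvColA_mem c x.toNat h1 h2 y, pvRowA_mem c x.toNat h1 h2 y,
      pvLeftB_mem c x.toNat h1 (by omega) y, pvRightB_mem c x.toNat h1 (by omega) y]
  · rw [PySem.Set.mem_inter, PySem.Set.mem_ofList, PySem.Set.mem_ofList,
      pvColA_mem c x.toNat h1 h2 0, pvRowA_mem c x.toNat h1 h2 0]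
    exact ⟨Or.inl rfl, Or.inl rfl⟩
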